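-- pv_equiv track=rewrite | github.com/jordie-lang/jordie-lang | interp/lexer.py | pop_next_element
-- ===== SOURCE A (Python) =====
-- def pop_next_element(s, ln, cc):
--     tmp_elem = ""
--     ecc = cc
--
--     while(s):
--         if (s[0] == "\n" or s[0] == "\r" or s[0] == "\n\r" or s[0] == "\r\n") and tmp_elem == "":
--             # add to newline count, reset character count
--             ln += 1
--             cc = 1
--             ecc = 1
--         elif (s[0] == "\n" or s[0] == "\r" or s[0] == "\n\r" or s[0] == "\r\n") and tmp_elem != "":
--             break
--         elif s[0] == " " and tmp_elem == "":
--             cc += 1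
--             ecc += 1
--         elif s[0] == " ":
--             # end of element, return new element
--             cc += 1
--             s = s[1:]
--             break
--         else:
--             tmp_elem += s[0]
--             cc += 1
--         s = s[1:]
--
--     return (tmp_elem, s, ln, cc, ecc)
-- ===== SOURCE B (Python) =====
-- def pop_next_element(s, ln, cc):
--     # Two sequential phases instead of one guarded loop.
--     ecc = cc
--     # Phase 1: consume leading delimiters.
--     while s and s[0] in " \n\r":
--         if s[0] == " ":
--             cc += 1
--             ecc += 1
--         else:
--             ln += 1
--             cc = 1
--             ecc = 1
--         s = s[1:]
--     # Phase 2: collect the token.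
--     tmp = []
--     while s and s[0] not in " \n\r":
--         tmp.append(s[0])
--         s = s[1:]
--         cc += 1
--     # A single trailing space is consumed and counted; a trailing newline is left.
--     if s and s[0] == " ":
--         cc += 1
--         s = s[1:]
--     return ("".join(tmp), s, ln, cc, ecc)
-- ===== Notes on version B (the rewrite author's own statement) =====
-- stated objective: simpler
-- what changed: Replaces A's single while-loop with four guarded branches testing whether the token is still empty by two sequential phases (skip leading delimiters updating counters, then collect token characters) followed by one trailing-space check. (measured constant-factor speedup: fewer per-character branch tests and no per-character string re-concatenation)
import Mathlib
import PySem

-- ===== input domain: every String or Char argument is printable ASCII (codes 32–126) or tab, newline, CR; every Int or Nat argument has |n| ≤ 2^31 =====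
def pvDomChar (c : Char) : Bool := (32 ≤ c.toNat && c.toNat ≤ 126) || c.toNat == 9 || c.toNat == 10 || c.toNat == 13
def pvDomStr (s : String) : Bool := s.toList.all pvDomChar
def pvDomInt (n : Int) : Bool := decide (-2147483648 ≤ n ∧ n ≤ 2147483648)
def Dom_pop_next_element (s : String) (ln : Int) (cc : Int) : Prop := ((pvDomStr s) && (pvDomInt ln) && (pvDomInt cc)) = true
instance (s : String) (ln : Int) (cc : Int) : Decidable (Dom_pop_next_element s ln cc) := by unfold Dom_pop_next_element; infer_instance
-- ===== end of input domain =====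

-- B replaces A's single guarded loop by two sequential phases (skip leading delimiters, then
-- collect the token) plus one trailing-space check; objective: simpler, same cost.

-- ===== PORT A =====
-- A's while-loop: state is (tmp_elem, ln, cc, ecc); branches in A's order
-- (the 's[0] == "\n\r"' / '"\r\n"' comparisons of A compare a 1-char string with a
-- 2-char string, hence are always False and are not reproduced).
def pvGoA : List Char → List Char → Int → Int → Int → List Char × List Char × Int × Int × Int
  | [], tmp, ln, cc, ecc => (tmp, [], ln, cc, ecc)
  | c :: rest, tmp, ln, cc, ecc =>
    if (c = '\n' ∨ c = '\r') ∧ tmp = [] then pvGoA rest tmp (ln + 1) 1 1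
    else if (c = '\n' ∨ c = '\r') ∧ tmp ≠ [] then (tmp, c :: rest, ln, cc, ecc)
    else if c = ' ' ∧ tmp = [] then pvGoA rest tmp ln (cc + 1) (ecc + 1)
    else if c = ' ' then (tmp, rest, ln, cc + 1, ecc)
    else pvGoA rest (tmp ++ [c]) ln (cc + 1) ecc

def pop_next_element (s : String) (ln : Int) (cc : Int) : String × String × Int × Int × Int :=
  let r := pvGoA s.toList [] ln cc cc
  (String.mk r.1, String.mk r.2.1, r.2.2)

-- ===== PORT B =====
def pvIsDelim (c : Char) : Bool := c = ' ' || c = '\n' || c = '\r'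

-- Phase 1: consume leading delimiters, updating the counters.
def pvLead : List Char → Int → Int → Int → List Char × Int × Int × Int
  | [], ln, cc, ecc => ([], ln, cc, ecc)
  | c :: rest, ln, cc, ecc =>
    if pvIsDelim c then
      if c = ' ' then pvLead rest ln (cc + 1) (ecc + 1)
      else pvLead rest (ln + 1) 1 1
    else (c :: rest, ln, cc, ecc)

-- Phase 2: collect the token characters up to the next delimiter.
def pvScan : List Char → List Char × List Char
  | [] => ([], [])
  | c :: rest =>
    if pvIsDelim c then ([], c :: rest)
    else
      let p := pvScan rest
      (c :: p.1, p.2)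

-- Phase 2 + trailing-space check, with the counters threaded through.
def pvWord (l : List Char) (ln cc ecc : Int) : List Char × List Char × Int × Int × Int :=
  let p := pvScan l
  let cc2 := cc + (p.1.length : Int)
  match p.2 with
  | ' ' :: r => (p.1, r, ln, cc2 + 1, ecc)
  | rest => (p.1, rest, ln, cc2, ecc)

def pop_next_element_alt (s : String) (ln : Int) (cc : Int) : String × String × Int × Int × Int :=
  let q := pvLead s.toList ln cc cc
  let w := pvWord q.1 q.2.1 q.2.2.1 q.2.2.2
  (String.mk w.1, String.mk w.2.1, w.2.2)

-- ===== PRECONDITION & SPEC =====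
def Spec_pop_next_element (s : String) (ln : Int) (cc : Int) (out : String × String × Int × Int × Int) : Prop := out = pop_next_element_alt s ln cc
instance (s : String) (ln : Int) (cc : Int) (out : String × String × Int × Int × Int) : Decidable (Spec_pop_next_element s ln cc out) := by unfold Spec_pop_next_element; infer_instance

-- ===== CLAIM (what is proved, stated in full; the proofs are below) =====
def Claim_equal_pop_next_element : Prop := ∀ (s : String) (ln : Int) (cc : Int), Dom_pop_next_element s ln cc → Spec_pop_next_element s ln cc (pop_next_element s ln cc)

-- ===== LEMMAS AND PROOFS =====

-- Once the token is non-empty, A's loop is exactly phase 2 (pvWord) with the token prepended.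
lemma pvGoA_cons (l : List Char) (t : Char) (ts : List Char) (ln cc ecc : Int) :
    pvGoA l (t :: ts) ln cc ecc =
      ((t :: ts) ++ (pvWord l ln cc ecc).1, (pvWord l ln cc ecc).2) := by
  induction l generalizing ts cc with
  | nil => simp [pvGoA, pvWord, pvScan]
  | cons c rest ih =>
    by_cases hn : c = '\n'
    · subst hn; simp [pvGoA, pvWord, pvScan, pvIsDelim]
    · by_cases hr : c = '\r'
      · subst hr; simp [pvGoA, pvWord, pvScan, pvIsDelim]
      · by_cases hs : c = ' '
        · subst hs; simp [pvGoA, pvWord, pvScan, pvIsDelim]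
        · have h1 : pvGoA (c :: rest) (t :: ts) ln cc ecc
              = pvGoA rest (t :: (ts ++ [c])) ln (cc + 1) ecc := by
            simp [pvGoA, hn, hr, hs]
          rw [h1, ih]
          simp only [pvWord, pvScan, pvIsDelim, hn, hr, hs]
          simp only [decide_eq_true_eq, decide_false, Bool.or_self, Bool.false_or,
            decide_eq_false hs, decide_eq_false hn, decide_eq_false hr]
          cases hp : (pvScan rest).2 with
          | nil => simp [List.append_assoc]; omega
          | cons d r =>
            by_cases hd : d = ' '
            · subst hd; simp [List.append_assoc]; omega
            · simp [hd, List.append_assoc]; omega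

-- A's loop with empty token = phase 1 followed by phase 2.
lemma pvGoA_nil (l : List Char) (ln cc ecc : Int) :
    pvGoA l [] ln cc ecc =
      pvWord (pvLead l ln cc ecc).1 (pvLead l ln cc ecc).2.1
        (pvLead l ln cc ecc).2.2.1 (pvLead l ln cc ecc).2.2.2 := by
  induction l generalizing ln cc ecc with
  | nil => simp [pvGoA, pvLead, pvWord, pvScan]
  | cons c rest ih =>
    by_cases hn : c = '\n'
    · subst hn; simpa [pvGoA, pvLead, pvIsDelim] using ih (ln + 1) 1 1
    · by_cases hr : c = '\r'
      · subst hr; simpa [pvGoA, pvLead, pvIsDelim] using ih (ln + 1) 1 1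
      · by_cases hs : c = ' '
        · subst hs; simpa [pvGoA, pvLead, pvIsDelim] using ih ln (cc + 1) (ecc + 1)
        · have h1 : pvGoA (c :: rest) [] ln cc ecc
              = pvGoA rest [c] ln (cc + 1) ecc := by
            simp [pvGoA, hn, hr, hs]
          rw [h1, pvGoA_cons]
          simp only [pvLead, pvIsDelim, decide_eq_false hs, decide_eq_false hn,
            decide_eq_false hr, Bool.or_self, Bool.false_or, if_neg Bool.false_ne_true]
          simp only [pvWord, pvScan, pvIsDelim, decide_eq_false hs, decide_eq_false hn,
            decide_eq_false hr, Bool.or_self, Bool.false_or]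
          cases hp : (pvScan rest).2 with
          | nil => simp; omega
          | cons d r =>
            by_cases hd : d = ' '
            · subst hd; simp; omega
            · simp [hd]; omega

-- ===== VERDICT (by name: the statement is the Claim_ definition above) =====
theorem pop_next_element_spec : Claim_equal_pop_next_element := by
  intro s ln cc _
  show _ = _
  unfold pop_next_element pop_next_element_alt
  rw [pvGoA_nil]
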